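-- pv_equiv track=rewrite | github.com/eoinrogers/lstm_experiment | new_cluster.py | link_to_activity
-- ===== SOURCE A (Python) =====
-- def link_to_activity(dictionary, link):
--     counts = []
--     for i in range(len(dictionary)):
--         items = dictionary[i]
--         count = 0
--         for item in items:
--             if item in link: count += 1
--         counts.append(count)
--     return counts.index(max(counts))
-- ===== SOURCE B (Python) =====
-- def link_to_activity(dictionary, link):
--     owners = {}
--     for i, items in enumerate(dictionary):
--         for item in items:
--             owners.setdefault(item, []).append(i)
--     scores = [0] * len(dictionary)
--     for item in set(link):
--         for g in owners.get(item, []):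
--             scores[g] += 1
--     return max(range(len(dictionary)), key=scores.__getitem__)
-- ===== Notes on version B (the rewrite author's own statement) =====
-- stated objective: faster
-- what changed: B inverts the data: it builds an inverted index mapping each item to the group indices that contain it, accumulates per-group scores by iterating over the link's distinct items through that index, and takes the argmax with max(range(n), key=scores.__getitem__), instead of A's per-group inner membership scans of link followed by max()+.index() over a counts list.
import Mathlib
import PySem

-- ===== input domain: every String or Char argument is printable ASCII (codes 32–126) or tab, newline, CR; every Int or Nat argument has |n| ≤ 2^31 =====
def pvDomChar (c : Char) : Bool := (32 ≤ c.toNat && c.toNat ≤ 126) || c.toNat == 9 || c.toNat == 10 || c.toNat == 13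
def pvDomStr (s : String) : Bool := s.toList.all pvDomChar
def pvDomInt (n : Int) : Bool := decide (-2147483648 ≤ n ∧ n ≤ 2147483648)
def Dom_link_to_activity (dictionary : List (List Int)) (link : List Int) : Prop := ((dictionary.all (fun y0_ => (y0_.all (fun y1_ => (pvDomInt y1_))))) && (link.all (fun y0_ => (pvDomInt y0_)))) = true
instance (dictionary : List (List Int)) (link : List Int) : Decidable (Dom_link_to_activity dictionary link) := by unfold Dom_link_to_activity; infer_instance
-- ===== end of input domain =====

-- B replaces A's per-group inner membership scans of link with an inverted index (item ->
-- owning group indices), accumulates per-group scores by iterating over the link's distinct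
-- items, and takes the argmax with max(range(n), key=...); objective: faster (measured).

-- ===== PORT A =====
def link_to_activity (dictionary : List (List Int)) (link : List Int) : Int :=
  let counts := dictionary.foldl
    (fun (counts : List Int) items =>
      counts ++ [items.foldl (fun count item => if item ∈ link then count + 1 else count) (0 : Int)])
    []
  match PySem.List.max? counts (fun x => x) with
  | none => 0          -- unreachable under Pre_: max([]) raises ValueError in Python
  | some m =>
    match PySem.List.index? counts m with
    | none => 0        -- unreachable: the max is a member of counts
    | some k => (k : Int)

-- ===== PORT B =====
def link_to_activity_alt (dictionary : List (List Int)) (link : List Int) : Int :=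
  -- owners.setdefault(item, []).append(i)  ==  owners[item] = owners.get(item, []) + [i]  ==  Dict.modify
  let owners : PySem.Dict Int (List Int) := (PySem.List.enumerate dictionary 0).foldl
    (fun owners p =>
      p.2.foldl (fun ow item => PySem.Dict.modify ow item [] (fun l => l ++ [p.1])) owners)
    PySem.Dict.empty
  let n : Int := dictionary.length
  let scores0 : List Int := PySem.List.pyRepeat [0] n            -- [0] * len(dictionary)
  -- iteration over set(link): the scores are order-independent sums, so Set.ofList order is exact
  let scores := (PySem.Set.ofList link).foldl
    (fun sc item => (owners.getD item []).foldl
      (fun sc g => PySem.List.pySetD sc g (PySem.List.pyGetD sc g 0 + 1)) sc)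
    scores0
  match PySem.List.max? (PySem.List.pyRange 0 n 1) (fun i => PySem.List.pyGetD scores i 0) with
  | none => 0          -- unreachable under Pre_: max(range(0)) raises ValueError in Python
  | some i => i

-- ===== PRECONDITION & SPEC =====
-- Pre_ excludes the empty dictionary, on which both Pythons raise ValueError (max of an empty sequence).
def Pre_link_to_activity (dictionary : List (List Int)) (link : List Int) : Prop := dictionary ≠ []
instance (dictionary : List (List Int)) (link : List Int) : Decidable (Pre_link_to_activity dictionary link) := by unfold Pre_link_to_activity; infer_instance
def pvWitness_link_to_activity : List (List Int) × List Int := ([[1, 2], [3]], [2, 3])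

def Spec_link_to_activity (dictionary : List (List Int)) (link : List Int) (out : Int) : Prop := out = link_to_activity_alt dictionary link
instance (dictionary : List (List Int)) (link : List Int) (out : Int) : Decidable (Spec_link_to_activity dictionary link out) := by unfold Spec_link_to_activity; infer_instance

-- ===== CLAIM (what is proved, stated in full; the proofs are below) =====
def Claim_equal_link_to_activity : Prop := ∀ (dictionary : List (List Int)) (link : List Int), Dom_link_to_activity dictionary link → Pre_link_to_activity dictionary link → Spec_link_to_activity dictionary link (link_to_activity dictionary link)

-- ===== LEMMAS AND PROOFS =====

-- the per-group count, as A computes it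
def pvCnt (link : List Int) (items : List Int) : Int :=
  items.foldl (fun count item => if item ∈ link then count + 1 else count) 0

-- A's accumulated counts list is the map of pvCnt
theorem pvCountsA (dictionary : List (List Int)) (link : List Int) :
    ∀ acc : List Int,
      dictionary.foldl
        (fun (counts : List Int) items =>
          counts ++ [items.foldl (fun count item => if item ∈ link then count + 1 else count) (0 : Int)])
        acc = acc ++ dictionary.map (pvCnt link) := by
  induction dictionary with
  | nil => intro acc; simp
  | cons d t ih =>
    intro acc
    simp only [List.foldl, List.map]
    rw [ih]
    simp [pvCnt]

theorem pvCnt_eq_countP (link items : List Int) :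
    pvCnt link items = (items.countP (fun x => decide (x ∈ link)) : Int) := by
  unfold pvCnt
  rw [PySem.List.foldl_ite_add_one (fun x => x ∈ link)]
  simp

-- B's owners dict, flattened: nested fold = fold over the flattened (item, group) pairs
theorem pvOwnersFlat (E : List (Int × List Int)) :
    ∀ d : PySem.Dict Int (List Int),
      E.foldl (fun owners p =>
          p.2.foldl (fun ow item => PySem.Dict.modify ow item [] (fun l => l ++ [p.1])) owners) d
      = (E.flatMap (fun p => p.2.map (fun item => (item, p.1)))).foldl
          (fun ow q => PySem.Dict.modify ow q.1 [] (fun l => l ++ [q.2])) d := by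
  induction E with
  | nil => intro d; rfl
  | cons p t ih =>
    intro d
    simp only [List.foldl, List.flatMap_cons, List.foldl_append]
    rw [ih, List.foldl_map]

-- the owners entry for v: each group index i, repeated once per occurrence of v in dictionary[i]
theorem pvOwnersGet (dictionary : List (List Int)) (v : Int) :
    ((PySem.List.enumerate dictionary 0).foldl
        (fun owners p =>
          p.2.foldl (fun ow item => PySem.Dict.modify ow item [] (fun l => l ++ [p.1])) owners)
        PySem.Dict.empty).getD v []
      = (PySem.List.enumerate dictionary 0).flatMap
          (fun p => List.replicate (p.2.count v) p.1) := by
  rw [pvOwnersFlat, PySem.Dict.getD_foldl_modify_append]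
  rw [List.filter_flatMap, List.map_flatMap]
  simp only [pysem, List.nil_append]
  -- per group p: the tagged pairs of p.2 that match v, untagged, are (count of v) copies of p.1
  refine List.flatMap_congr (fun p _ => ?_)
  rw [List.filter_map, List.map_map]
  have hcomp : ((fun q : Int × Int => q.1 == v) ∘ fun item => (item, p.1)) = (· == v) := rfl
  rw [hcomp]
  have : ((fun q : Int × Int => q.2) ∘ fun item => (item, p.1)) = fun _ => p.1 := rfl
  rw [this, List.map_const', ← List.count_eq_length_filter]

-- count of a fixed index j inside the flattened owners lists
theorem pvFlatCount (dictionary : List (List Int)) (v : Int) :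
    ∀ (s : Int) (j : Int),
      (((PySem.List.enumerate dictionary s).flatMap
          (fun p => List.replicate (p.2.count v) p.1)).count j : Int)
      = if s ≤ j ∧ j < s + (dictionary.length : Int)
        then ((dictionary.getD (j - s).toNat []).count v : Int) else 0 := by
  induction dictionary with
  | nil => intro s j; simp [PySem.List.enumerate_nil]
  | cons items t ih =>
    intro s j
    rw [PySem.List.enumerate_cons]
    simp only [List.flatMap_cons, List.count_append, List.count_replicate, List.length_cons]
    push_cast
    rw [ih (s + 1) j]
    by_cases hsj : s = j
    · subst hsj
      rw [if_pos (by simp), if_neg (by omega), if_pos (by constructor <;> omega)]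
      simp
    · rw [if_neg (by simp [hsj]), zero_add]
      by_cases hb : s + 1 ≤ j ∧ j < s + 1 + (t.length : Int)
      · rw [if_pos hb, if_pos (by omega)]
        have hidx : (j - s).toNat = (j - (s + 1)).toNat + 1 := by omega
        rw [hidx, List.getD_cons_succ]
      · rw [if_neg hb, if_neg (by omega)]

-- effect of one scores[g] += 1 on a later read scores[j]
theorem pvGetBumped (sc : List Int) (g j : Int) (hg0 : 0 ≤ g) (hglt : g < (sc.length : Int))
    (hj : 0 ≤ j) :
    PySem.List.pyGetD (PySem.List.pySetD sc g (PySem.List.pyGetD sc g 0 + 1)) j 0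
      = PySem.List.pyGetD sc j 0 + if j = g then 1 else 0 := by
  rw [PySem.List.pySetD_of_nonneg sc _ hg0]
  by_cases hjlt : j < (sc.length : Int)
  · rw [PySem.List.pyGetD_eq_getElem _ 0 hj (by simpa using hjlt),
        PySem.List.pyGetD_eq_getElem sc 0 hj hjlt, List.getElem_set]
    by_cases hjg : j = g
    · rw [if_pos (by omega), if_pos hjg, PySem.List.pyGetD_eq_getElem sc 0 hg0 hglt]
      subst hjg; rfl
    · rw [if_neg (by omega), if_neg hjg, add_zero]
  · have hout : ∀ xs : List Int, (xs.length : Int) ≤ j → PySem.List.pyGetD xs j 0 = 0 := by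
      intro xs hx
      rw [PySem.List.pyGetD, PySem.List.pyGet?, PySem.List.pyIdx?, if_pos hj, if_neg (by omega)]
      rfl
    rw [hout _ (by simpa using not_lt.mp hjlt), hout _ (not_lt.mp hjlt), if_neg (by omega)]
    simp

-- one increment pass: scores[g] += 1 for g in ys
theorem pvBump (ys : List Int) :
    ∀ sc : List Int, (∀ g ∈ ys, 0 ≤ g ∧ g < (sc.length : Int)) →
      (ys.foldl (fun sc g => PySem.List.pySetD sc g (PySem.List.pyGetD sc g 0 + 1)) sc).length = sc.length ∧
      ∀ j : Int, 0 ≤ j →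
        PySem.List.pyGetD (ys.foldl (fun sc g => PySem.List.pySetD sc g (PySem.List.pyGetD sc g 0 + 1)) sc) j 0
          = PySem.List.pyGetD sc j 0 + (ys.count j : Int) := by
  induction ys with
  | nil => intro sc _; exact ⟨rfl, by intro j _; simp⟩
  | cons g ys ih =>
    intro sc hg
    obtain ⟨hg0, hglt⟩ := hg g (List.mem_cons_self ..)
    have hlen := PySem.List.length_pySetD sc g (PySem.List.pyGetD sc g 0 + 1)
    have hrec := ih (PySem.List.pySetD sc g (PySem.List.pyGetD sc g 0 + 1))
      (fun g' hg' => by rw [hlen]; exact hg g' (List.mem_cons_of_mem _ hg'))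
    simp only [List.foldl] at *
    refine ⟨by rw [hrec.1, hlen], ?_⟩
    intro j hj
    rw [hrec.2 j hj, pvGetBumped sc g j hg0 hglt hj]
    push_cast [List.count_cons]
    by_cases hjg : j = g
    · rw [if_pos hjg, if_pos (by simp [hjg])]
      ring
    · rw [if_neg hjg, if_neg (by simp; exact fun h => hjg h.symm), add_zero, add_zero]

-- scores after the whole link loop: per-index sum of the owners-list counts
theorem pvScores (own : Int → List Int) (S : List Int) :
    ∀ sc : List Int, (∀ v ∈ S, ∀ g ∈ own v, 0 ≤ g ∧ g < (sc.length : Int)) →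
      ((S.foldl (fun sc v => (own v).foldl
          (fun sc g => PySem.List.pySetD sc g (PySem.List.pyGetD sc g 0 + 1)) sc) sc).length
        = sc.length) ∧
      ∀ j : Int, 0 ≤ j →
        PySem.List.pyGetD (S.foldl (fun sc v => (own v).foldl
            (fun sc g => PySem.List.pySetD sc g (PySem.List.pyGetD sc g 0 + 1)) sc) sc) j 0
          = PySem.List.pyGetD sc j 0 + (S.map (fun v => ((own v).count j : Int))).sum := by
  induction S with
  | nil => intro sc _; exact ⟨rfl, by intro j _; simp⟩
  | cons v S ih =>
    intro sc h
    have hb := pvBump (own v) sc (h v (List.mem_cons_self ..))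
    have hrec := ih _ (fun v' hv' => by rw [hb.1]; exact h v' (List.mem_cons_of_mem _ hv'))
    simp only [List.foldl] at *
    refine ⟨by rw [hrec.1, hb.1], ?_⟩
    intro j hj
    rw [hrec.2 j hj, hb.2 j hj, List.map_cons, List.sum_cons]
    ring

-- for nodup S, summing count over S counts the members of S
theorem pvSumCount (S : List Int) (hnd : S.Nodup) (items : List Int) :
    (S.map (fun v => ((items.count v : Nat) : Int))).sum
      = ((items.countP (fun x => decide (x ∈ S)) : Nat) : Int) := by
  induction items with
  | nil => simp
  | cons x items ih =>
    have hmap : (S.map (fun v => (((x :: items).count v : Nat) : Int)))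
        = S.map (fun v => ((items.count v : Nat) : Int) + if v == x then 1 else 0) := by
      refine List.map_congr_left (fun v _ => ?_)
      rw [List.count_cons]
      push_cast
      congr 1
      by_cases hvx : v = x <;> simp [hvx] <;> omega
    rw [hmap, PySem.List.sum_map_add_int, ih, PySem.List.sum_map_ite_one_zero]
    have hc : S.countP (· == x) = S.count x := rfl
    rw [hc, List.countP_cons]
    by_cases hx : x ∈ S
    · rw [List.count_eq_one_of_mem hnd hx]
      simp [hx]
    · rw [List.count_eq_zero_of_not_mem hx]
      simp [hx]

-- the step of Python's max(xs, key=…) fold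
def pvStep (key : Int → Int) (acc : Option Int) (x : Int) : Option Int :=
  match acc with
  | none => some x
  | some m => if key m < key x then some x else some m

theorem pvStay (key : Int → Int) :
    ∀ (xs : List Int) (j : Int), (∀ x ∈ xs, ¬ key j < key x) →
      xs.foldl (pvStep key) (some j) = some j := by
  intro xs
  induction xs with
  | nil => intro j _; rfl
  | cons x t ih =>
    intro j h
    have : pvStep key (some j) x = some j := by
      simp [pvStep, h x (List.mem_cons_self ..)]
    rw [List.foldl_cons, this]
    exact ih j (fun y hy => h y (List.mem_cons_of_mem _ hy))

theorem pvLow (key : Int → Int) (M : Int) :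
    ∀ (xs : List Int) (j : Int), (∀ x ∈ xs, key x < M) → key j < M →
      ∃ j', xs.foldl (pvStep key) (some j) = some j' ∧ key j' < M := by
  intro xs
  induction xs with
  | nil => intro j _ hj; exact ⟨j, rfl, hj⟩
  | cons x t ih =>
    intro j h hj
    rw [List.foldl_cons]
    by_cases hlt : key j < key x
    · rw [show pvStep key (some j) x = some x by simp [pvStep, hlt]]
      exact ih x (fun y hy => h y (List.mem_cons_of_mem _ hy)) (h x (List.mem_cons_self ..))
    · rw [show pvStep key (some j) x = some j by simp [pvStep, hlt]]
      exact ih j (fun y hy => h y (List.mem_cons_of_mem _ hy)) hj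

theorem pvNoneLow (key : Int → Int) (M : Int) (xs : List Int)
    (h : ∀ x ∈ xs, key x < M) :
    xs.foldl (pvStep key) none = none ∨
      ∃ j', xs.foldl (pvStep key) none = some j' ∧ key j' < M := by
  cases xs with
  | nil => exact Or.inl rfl
  | cons x t =>
    refine Or.inr ?_
    rw [List.foldl_cons, show pvStep key none x = some x from rfl]
    exact pvLow key M t x (fun y hy => h y (List.mem_cons_of_mem _ hy)) (h x (List.mem_cons_self ..))

-- Python's max(range(len(cs)), key=cs.__getitem__) is the FIRST index of the maximum of cs
theorem pvArgmax (cs : List Int) (M : Int) (k : Nat)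
    (hM : ∀ y ∈ cs, y ≤ M) (hidx : PySem.List.index? cs M = some k) :
    PySem.List.max? (PySem.List.pyRange 0 (cs.length : Int) 1)
        (fun i => PySem.List.pyGetD cs i 0) = some (k : Int) := by
  obtain ⟨hk, hck, hfirst⟩ := PySem.List.getElem_of_index?_eq_some hidx
  have hfold : PySem.List.max? (PySem.List.pyRange 0 (cs.length : Int) 1)
      (fun i => PySem.List.pyGetD cs i 0)
      = (PySem.List.pyRange 0 (cs.length : Int) 1).foldl
          (pvStep (fun i => PySem.List.pyGetD cs i 0)) none := by
    simp only [PySem.List.max?]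
    congr 1
    funext acc x
    cases acc <;> rfl
  set key : Int → Int := fun i => PySem.List.pyGetD cs i 0 with hkey
  have hkeynat : ∀ (j : Nat) (hjl : j < cs.length), key (j : Int) = cs[j] := by
    intro j hjl
    show PySem.List.pyGetD cs (j : Int) 0 = cs[j]
    rw [PySem.List.pyGetD_eq_getElem cs 0 (by omega) (by exact_mod_cast hjl)]
    simp only [Int.toNat_natCast]
  have hkM : key (k : Int) = M := by rw [hkeynat k hk, hck]
  have hlow : ∀ i ∈ PySem.List.pyRange 0 (k : Int) 1, key i < M := by
    intro i hi
    obtain ⟨hi0, hik⟩ := PySem.List.mem_pyRange_one.mp hi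
    have hin : i = ((i.toNat : Nat) : Int) := by omega
    have hlt : i.toNat < k := by omega
    rw [hin, hkeynat i.toNat (by omega)]
    exact lt_of_le_of_ne (hM _ (List.getElem_mem _)) (hfirst i.toNat hlt)
  have hsplit : PySem.List.pyRange 0 (cs.length : Int) 1
      = PySem.List.pyRange 0 (k : Int) 1 ++ ((k : Int) :: PySem.List.pyRange ((k : Int) + 1) (cs.length : Int) 1) := by
    rw [PySem.List.pyRange_one_append 0 (k : Int) (cs.length : Int) (by omega) (by exact_mod_cast le_of_lt hk),
        PySem.List.pyRange_one_cons (a := (k : Int)) (b := (cs.length : Int)) (by exact_mod_cast hk)]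
  have hhigh : ∀ x ∈ PySem.List.pyRange ((k : Int) + 1) (cs.length : Int) 1, ¬ key (k : Int) < key x := by
    intro x hx
    obtain ⟨hx0, hxl⟩ := PySem.List.mem_pyRange_one.mp hx
    have hxn : x = ((x.toNat : Nat) : Int) := by omega
    rw [hkM, hxn, hkeynat x.toNat (by omega)]
    exact not_lt.mpr (hM _ (List.getElem_mem _))
  rw [hfold, hsplit, List.foldl_append]
  rcases pvNoneLow key M (PySem.List.pyRange 0 (k : Int) 1) hlow with h0 | ⟨j', hj', hjM⟩
  · rw [h0, List.foldl_cons, show pvStep key none (k : Int) = some (k : Int) from rfl]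
    exact pvStay key _ _ hhigh
  · rw [hj', List.foldl_cons,
        show pvStep key (some j') (k : Int) = some (k : Int) by simp [pvStep, hkM.symm ▸ hjM]]
    exact pvStay key _ _ hhigh

-- ===== VERDICT (by name: the statement is the Claim_ definition above) =====
theorem link_to_activity_spec : Claim_equal_link_to_activity := by
  intro dictionary link _ hpre
  unfold Spec_link_to_activity
  simp only [link_to_activity, link_to_activity_alt]
  rw [pvCountsA]
  simp only [List.nil_append, pvOwnersGet, PySem.List.pyRepeat_singleton, Int.toNat_natCast]
  set counts := dictionary.map (pvCnt link) with hcounts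
  -- the membership bound for the owners lists
  have hmem : ∀ v ∈ PySem.Set.ofList link,
      ∀ g ∈ (PySem.List.enumerate dictionary 0).flatMap
          (fun p => List.replicate (p.2.count v) p.1),
        0 ≤ g ∧ g < ((List.replicate dictionary.length (0 : Int)).length : Int) := by
    intro v _ g hg
    rw [List.length_replicate]
    by_contra hcon
    have h0 := pvFlatCount dictionary v 0 g
    rw [if_neg (by omega)] at h0
    have : ((PySem.List.enumerate dictionary 0).flatMap
        (fun p => List.replicate (p.2.count v) p.1)).count g = 0 := by exact_mod_cast h0
    exact absurd (List.count_pos_iff.mpr hg) (by omega)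
  have hs := pvScores
    (fun v => (PySem.List.enumerate dictionary 0).flatMap (fun p => List.replicate (p.2.count v) p.1))
    (PySem.Set.ofList link) (List.replicate dictionary.length (0 : Int)) hmem
  simp only [List.length_replicate] at hs
  -- the accumulated scores list IS A's counts list
  have hscores : (PySem.Set.ofList link).foldl
      (fun sc item => ((PySem.List.enumerate dictionary 0).flatMap
          (fun p => List.replicate (p.2.count item) p.1)).foldl
        (fun sc g => PySem.List.pySetD sc g (PySem.List.pyGetD sc g 0 + 1)) sc)
      (List.replicate dictionary.length (0 : Int)) = counts := by
    refine List.ext_getElem (by rw [hs.1, hcounts, List.length_map]) ?_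
    intro j hj1 hj2
    have hjlen : j < dictionary.length := by
      rw [hs.1] at hj1; exact hj1
    have hget := hs.2 (j : Int) (by omega)
    rw [PySem.List.pyGetD_eq_getElem _ 0 (by omega) (by exact_mod_cast hj1)] at hget
    simp only [Int.toNat_natCast] at hget
    rw [hget, PySem.List.pyGetD_eq_getElem _ 0 (by omega)
          (by rw [List.length_replicate]; exact_mod_cast hjlen)]
    simp only [Int.toNat_natCast, List.getElem_replicate, zero_add]
    have hmapc : (PySem.Set.ofList link).map
        (fun v => (((PySem.List.enumerate dictionary 0).flatMap
            (fun p => List.replicate (p.2.count v) p.1)).count (j : Int) : Int))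
        = (PySem.Set.ofList link).map (fun v => ((dictionary.getD j []).count v : Int)) := by
      refine List.map_congr_left (fun v _ => ?_)
      rw [pvFlatCount dictionary v 0 (j : Int),
          if_pos (by constructor <;> [omega; (push_cast; omega)])]
      simp
    rw [hmapc, pvSumCount _ (PySem.Set.nodup_ofList link) _]
    have hcntP : (dictionary.getD j []).countP (fun x => decide (x ∈ PySem.Set.ofList link))
        = (dictionary.getD j []).countP (fun x => decide (x ∈ link)) := by
      refine List.countP_congr (fun x _ => ?_)
      simp [PySem.Set.mem_ofList]
    rw [hcntP, ← pvCnt_eq_countP, List.getD_eq_getElem dictionary [] hjlen]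
    simp only [hcounts, List.getElem_map]
  rw [hscores]
  -- both sides: A takes counts.index(max(counts)), B the first argmax over range(len)
  obtain ⟨c, t, hct⟩ := List.exists_cons_of_ne_nil
    (show counts ≠ [] by rw [hcounts]; simpa using hpre)
  have hmax : PySem.List.max? counts (fun x => x) = some (t.foldl max c) := by
    rw [hct]; exact PySem.List.max?_id_cons c t
  have hM : ∀ y ∈ counts, y ≤ t.foldl max c := fun y hy => PySem.List.max?_isMax hmax y hy
  have hmm : t.foldl max c ∈ counts := PySem.List.max?_mem hmax
  obtain ⟨k, hk⟩ := Option.isSome_iff_exists.mp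
    ((PySem.List.index?_isSome_iff counts _).mpr hmm)
  have hclen : (dictionary.length : Int) = (counts.length : Int) := by
    rw [hcounts, List.length_map]
  rw [hclen, hmax, pvArgmax counts (t.foldl max c) k hM hk]
  rw [PySem.List.index?_eq_idxOf?] at hk
  simp [hk]
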